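-- pv_equiv track=rewrite | github.com/secretdsy/Programmers | level3/bs/43237.py | solution
-- ===== SOURCE A (Python) =====
-- def solution(budgets, M):
--     answer = 0
--     budgets.sort()
--     N = len(budgets)
--
--     if(sum(budgets) <= M):
--         return budgets[-1]
--
--     elif(budgets[0] > M//N):
--         return M//N
--
--     else:
--         i=0
--         n = N # 남은 사람의 수
--         while(i<=N):
--             if (i==N):
--                 # 모든 예산이 남은 예산의 평균보다 작아서 가장 큰 예산을 요구하는 도시까지 온 경우
--                 return M
--
--             elif (budgets[i] < M//n):
--                 # 남은 예산의 평균값보다 작으면 전체 예산에서 요청한 예산 빼고 평균 값 구하기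
--                 M-=budgets[i]
--                 n-=1
--                 i+=1
--
--             elif (budgets[i] >= M//n):
--                 # 평균값보다 예산이 크거나 같으면 상한액은 평균값
--                 return M//n
--
--     return answer
-- ===== SOURCE B (Python) =====
-- # B: instead of A's element-by-element greedy (mutating M, n, i), compute prefix sums once,
-- # then run rounds: each round takes the floor-average cap q of the remaining suffix and uses a
-- # binary search (hand-written bisect_left) to jump over the whole block of budgets below q at
-- # once; the first round whose block is empty yields the answer. Like A, sorts budgets in place.
--
-- def _bisect_left(a, x, lo):
--     hi = len(a)
--     while lo < hi:
--         mid = (lo + hi) // 2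
--         if a[mid] < x:
--             lo = mid + 1
--         else:
--             hi = mid
--     return lo
--
-- def _prefix(budgets):
--     pref = [0]
--     for b in budgets:
--         pref.append(pref[-1] + b)
--     return pref
--
-- def solution(budgets, M):
--     budgets.sort()
--     N = len(budgets)
--     pref = _prefix(budgets)
--     if pref[N] <= M:
--         return budgets[-1]
--     i = 0
--     while True:
--         q = (M - pref[i]) // (N - i)
--         j = _bisect_left(budgets, q, i)
--         if j == i:
--             return q
--         i = j
-- ===== Notes on version B (the rewrite author's own statement) =====
-- stated objective: alternative
-- what changed: A's one-element-at-a-time greedy while-loop (mutating M, n, i with a floor division and subtraction per element) is replaced by prefix sums computed once plus rounds that each take the floor-average cap of the remaining suffix and jump over the whole block of smaller budgets with a hand-written binary search, stopping at the first empty block.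
import Mathlib
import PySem

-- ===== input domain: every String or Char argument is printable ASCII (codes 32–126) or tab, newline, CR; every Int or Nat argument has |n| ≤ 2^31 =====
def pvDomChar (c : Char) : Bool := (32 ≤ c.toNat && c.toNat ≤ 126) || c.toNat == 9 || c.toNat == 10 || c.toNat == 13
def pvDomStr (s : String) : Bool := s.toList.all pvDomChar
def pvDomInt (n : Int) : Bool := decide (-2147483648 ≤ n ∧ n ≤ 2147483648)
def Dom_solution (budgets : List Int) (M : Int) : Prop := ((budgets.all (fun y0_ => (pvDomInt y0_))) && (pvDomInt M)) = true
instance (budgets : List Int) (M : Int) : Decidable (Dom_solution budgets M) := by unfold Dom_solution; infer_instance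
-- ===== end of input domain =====

-- B replaces A's element-by-element greedy while-loop by prefix sums plus block rounds with a
-- binary search; equivalence is about the RETURN value (both Pythons sort `budgets` in place).

-- ===== PORT A =====
lemma loopA_dec (N i : Nat) (h1 : ¬ N < i) (h2 : ¬ i = N) : N - (i + 1) < N - i := by omega

-- the while(i<=N) loop of A, state (i, M, n); answer = 0 is A's (unreachable) fall-through value
def loopA (bs : List Int) (N : Nat) (i : Nat) (M n : Int) : Int :=
  if h1 : N < i then 0
  else if h2 : i = N then M
  else
    let b := (PySem.List.pyGet? bs (i : Int)).getD 0
    if b < PySem.Int.floordiv M n then loopA bs N (i + 1) (M - b) (n - 1)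
    else PySem.Int.floordiv M n
  termination_by N - i
  decreasing_by exact loopA_dec N i h1 h2

def solution (budgets : List Int) (M : Int) : Int :=
  let bs := PySem.List.sorted budgets (fun x => x) false
  let N := bs.length
  if bs.sum ≤ M then (PySem.List.pyGet? bs (-1)).getD 0
  else if (PySem.List.pyGet? bs 0).getD 0 > PySem.Int.floordiv M (N : Int) then
    PySem.Int.floordiv M (N : Int)
  else loopA bs N 0 M (N : Int)

-- ===== PORT B =====
-- _bisect_left(a, x, lo): the while(lo<hi) loop, state (lo, hi)
-- termination measures for the ports (cited by name in decreasing_by)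
lemma bisect_dec1 (lo hi : Nat) (h : lo < hi) : hi - ((lo + hi) / 2 + 1) < hi - lo := by omega

lemma bisect_dec2 (lo hi : Nat) (h : lo < hi) : (lo + hi) / 2 - lo < hi - lo := by omega

def bisectGo (a : List Int) (x : Int) (lo hi : Nat) : Nat :=
  if h : lo < hi then
    let mid := (lo + hi) / 2
    if (PySem.List.pyGet? a (mid : Int)).getD 0 < x then bisectGo a x (mid + 1) hi
    else bisectGo a x lo mid
  else lo
  termination_by hi - lo
  decreasing_by
  · exact bisect_dec1 lo hi h
  · exact bisect_dec2 lo hi h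

-- _prefix(budgets): pref = [0]; for b in budgets: pref.append(pref[-1] + b)
def prefixB (budgets : List Int) : List Int :=
  budgets.foldl (fun pref b => pref ++ [(PySem.List.pyGet? pref (-1)).getD 0 + b]) [0]

-- bounds of bisectGo, needed for capB's termination (cited there by name)
lemma bisectGo_ge (a : List Int) (x : Int) : ∀ d lo hi, hi - lo = d → lo ≤ bisectGo a x lo hi := by
  intro d
  induction d using Nat.strong_induction_on with
  | _ d ih =>
    intro lo hi hd
    rw [bisectGo]
    dsimp only
    split
    · rename_i h
      split
      · have := ih (hi - (( lo + hi) / 2 + 1)) (by omega) ((lo + hi) / 2 + 1) hi rfl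
        omega
      · exact ih ((lo + hi) / 2 - lo) (by omega) lo ((lo + hi) / 2) rfl
    · exact le_refl lo

lemma bisectGo_le (a : List Int) (x : Int) : ∀ d lo hi, hi - lo = d → lo ≤ hi → bisectGo a x lo hi ≤ hi := by
  intro d
  induction d using Nat.strong_induction_on with
  | _ d ih =>
    intro lo hi hd hle
    rw [bisectGo]
    dsimp only
    split
    · rename_i h
      split
      · exact ih (hi - ((lo + hi) / 2 + 1)) (by omega) ((lo + hi) / 2 + 1) hi rfl (by omega)
      · have := ih ((lo + hi) / 2 - lo) (by omega) lo ((lo + hi) / 2) rfl (by omega)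
        omega
    · omega

lemma capB_dec (budgets pref : List Int) (M : Int) (i : Nat)
    (h : ¬ bisectGo budgets (PySem.Int.floordiv (M - (PySem.List.pyGet? pref (i : Int)).getD 0) ((budgets.length : Int) - (i : Int))) i budgets.length = i) :
    budgets.length - bisectGo budgets (PySem.Int.floordiv (M - (PySem.List.pyGet? pref (i : Int)).getD 0) ((budgets.length : Int) - (i : Int))) i budgets.length < budgets.length - i := by
  by_cases hi : i ≤ budgets.length
  · have h1 := bisectGo_ge budgets (PySem.Int.floordiv (M - (PySem.List.pyGet? pref (i : Int)).getD 0) ((budgets.length : Int) - (i : Int))) (budgets.length - i) i budgets.length rfl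
    have h2 := bisectGo_le budgets (PySem.Int.floordiv (M - (PySem.List.pyGet? pref (i : Int)).getD 0) ((budgets.length : Int) - (i : Int))) (budgets.length - i) i budgets.length rfl hi
    omega
  · have h1 : bisectGo budgets (PySem.Int.floordiv (M - (PySem.List.pyGet? pref (i : Int)).getD 0) ((budgets.length : Int) - (i : Int))) i budgets.length = i := by
      rw [bisectGo]
      simp only [dif_neg (by omega : ¬ i < budgets.length)]
    omega

-- the while True round loop of B, state i; pref and budgets are read-only
def capB (budgets pref : List Int) (M : Int) (i : Nat) : Int :=
  let q := PySem.Int.floordiv (M - (PySem.List.pyGet? pref (i : Int)).getD 0)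
      ((budgets.length : Int) - (i : Int))
  let j := bisectGo budgets q i budgets.length
  if h : j = i then q
  else capB budgets pref M j
  termination_by budgets.length - i
  decreasing_by exact capB_dec budgets pref M i h

def solution_alt (budgets : List Int) (M : Int) : Int :=
  let bs := PySem.List.sorted budgets (fun x => x) false
  let N := bs.length
  let pref := prefixB bs
  if (PySem.List.pyGet? pref (N : Int)).getD 0 ≤ M then (PySem.List.pyGet? bs (-1)).getD 0
  else capB bs pref M 0

-- ===== PRECONDITION & SPEC =====
-- Pre_ excludes only the empty list, on which both Pythons raise (IndexError from budgets[-1],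
-- or ZeroDivisionError from M // 0).
def Pre_solution (budgets : List Int) (M : Int) : Prop := budgets ≠ []
instance (budgets : List Int) (M : Int) : Decidable (Pre_solution budgets M) := by
  unfold Pre_solution; infer_instance

def pvWitness_solution : List Int × Int := ([1, 2, 3], 4)

def Spec_solution (budgets : List Int) (M : Int) (out : Int) : Prop := out = solution_alt budgets M
instance (budgets : List Int) (M : Int) (out : Int) : Decidable (Spec_solution budgets M out) := by
  unfold Spec_solution; infer_instance

-- ===== CLAIM (what is proved, stated in full; the proofs are below) =====
def Claim_equal_solution : Prop := ∀ (budgets : List Int) (M : Int), Dom_solution budgets M → Pre_solution budgets M → Spec_solution budgets M (solution budgets M)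

-- ===== LEMMAS AND PROOFS =====

-- normalise indexing: bs[k] for a Nat k in range
lemma gd_eq (bs : List Int) (k : Nat) : (PySem.List.pyGet? bs (k : Int)).getD 0 = bs.getD k 0 := by
  simp [List.getD_eq_getElem?_getD]

-- the prefix list is the list of prefix sums
lemma prefixB_eq (bs : List Int) :
    prefixB bs = (List.range (bs.length + 1)).map (fun i => (bs.take i).sum) := by
  induction bs using List.reverseRecOn with
  | nil => rfl
  | append_singleton xs b ih =>
    unfold prefixB at ih ⊢
    rw [List.foldl_append, ih]
    have hlast : (PySem.List.pyGet? ((List.range (xs.length + 1)).map (fun i => (xs.take i).sum)) (-1)).getD 0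
        = xs.sum := by
      rw [PySem.List.pyGet?_neg_one]
      rw [List.range_succ, List.map_append]
      simp
    simp only [List.foldl_cons, List.foldl_nil, hlast]
    rw [List.length_append, List.length_singleton, List.range_succ (n := xs.length + 1), List.map_append]
    congr 1
    · apply List.map_congr_left
      intro i hi
      rw [List.mem_range] at hi
      rw [List.take_append_of_le_length (by omega)]
    · simp [List.take_of_length_le (by simp : (xs ++ [b]).length ≤ xs.length + 1)]

lemma prefixB_getD (bs : List Int) (k : Nat) (hk : k ≤ bs.length) :
    (prefixB bs).getD k 0 = (bs.take k).sum := by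
  rw [prefixB_eq]
  rw [List.getD_eq_getElem?_getD, List.getElem?_map, List.getElem?_range (by omega)]
  rfl

-- sorted access is monotone
lemma sorted_getD_mono (bs : List Int) (hs : List.Pairwise (· ≤ ·) bs) {k l : Nat}
    (hkl : k ≤ l) (hl : l < bs.length) : bs.getD k 0 ≤ bs.getD l 0 := by
  rcases Nat.lt_or_ge k l with h | h
  · have hk : k < bs.length := by omega
    have := (List.pairwise_iff_getElem.mp hs) k l hk hl h
    rwa [List.getD_eq_getElem (hn := hk), List.getD_eq_getElem (hn := hl)]
  · have : k = l := by omega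
    subst this; rfl

-- what bisectGo returns: everything strictly left of it is < x, the element at it (if any) is ≥ x
lemma bisectGo_inv (a : List Int) (x : Int) : ∀ d lo hi, hi - lo = d → lo ≤ hi →
    (lo < bisectGo a x lo hi → a.getD (bisectGo a x lo hi - 1) 0 < x) ∧
    (bisectGo a x lo hi < hi → x ≤ a.getD (bisectGo a x lo hi) 0) := by
  intro d
  induction d using Nat.strong_induction_on with
  | _ d ih =>
    intro lo hi hd hle
    rw [bisectGo]
    dsimp only
    split
    · rename_i hlh
      rw [gd_eq]
      split
      · rename_i hmidlt
        have h1 := bisectGo_ge a x (hi - ((lo + hi) / 2 + 1)) ((lo + hi) / 2 + 1) hi rfl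
        have hrec := ih (hi - ((lo + hi) / 2 + 1)) (by omega) ((lo + hi) / 2 + 1) hi rfl (by omega)
        refine ⟨?_, hrec.2⟩
        intro _
        by_cases hcase : (lo + hi) / 2 + 1 < bisectGo a x ((lo + hi) / 2 + 1) hi
        · exact hrec.1 hcase
        · have heq : bisectGo a x ((lo + hi) / 2 + 1) hi = (lo + hi) / 2 + 1 := by omega
          rw [heq]
          simpa using hmidlt
      · rename_i hmidge
        have h2 := bisectGo_le a x ((lo + hi) / 2 - lo) lo ((lo + hi) / 2) rfl (by omega)
        have h1 := bisectGo_ge a x ((lo + hi) / 2 - lo) lo ((lo + hi) / 2) rfl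
        have hrec := ih ((lo + hi) / 2 - lo) (by omega) lo ((lo + hi) / 2) rfl (by omega)
        refine ⟨hrec.1, ?_⟩
        intro _
        by_cases hcase : bisectGo a x lo ((lo + hi) / 2) < (lo + hi) / 2
        · exact hrec.2 hcase
        · have heq : bisectGo a x lo ((lo + hi) / 2) = (lo + hi) / 2 := by omega
          rw [heq]
          omega
    · exact ⟨fun h2 => absurd h2 (by omega), fun h2 => absurd h2 (by omega)⟩

-- a list of elements all < q sums to at most length * (q - 1)
lemma sum_le_of_all_lt (l : List Int) (q : Int) (h : ∀ x ∈ l, x < q) :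
    l.sum ≤ (l.length : Int) * (q - 1) := by
  induction l with
  | nil => simp
  | cons a t ih =>
    have ha := h a (by simp)
    have ht := ih (fun x hx => h x (by simp [hx]))
    simp only [List.sum_cons, List.length_cons]
    push_cast
    nlinarith

-- A's loop consumes a whole block of budgets all below q0 in one batch
lemma loopA_batch (bs : List Int) :
    ∀ d i (M' q0 : Int), i + d < bs.length →
      q0 ≤ PySem.Int.floordiv M' ((bs.length : Int) - (i : Int)) →
      (∀ k, i ≤ k → k < i + d → bs.getD k 0 < q0) →
      loopA bs bs.length i M' ((bs.length : Int) - (i : Int)) =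
        loopA bs bs.length (i + d) (M' - ((bs.drop i).take d).sum)
          ((bs.length : Int) - ((i + d : Nat) : Int)) := by
  intro d
  induction d with
  | zero => intro i M' q0 _ _ _; simp
  | succ d ih =>
    intro i M' q0 hlt hq hall
    have hiN : i < bs.length := by omega
    have hpos : (0 : Int) < (bs.length : Int) - (i : Int) := by
      have : (i : Int) < (bs.length : Int) := by exact_mod_cast hiN
      omega
    rw [loopA, dif_neg (by omega), dif_neg (by omega)]
    have hb : (PySem.List.pyGet? bs (i : Int)).getD 0 = bs.getD i 0 := gd_eq bs i
    rw [hb]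
    have hbi : bs.getD i 0 < q0 := hall i le_rfl (by omega)
    rw [if_pos (by
      calc bs.getD i 0 < q0 := hbi
        _ ≤ _ := hq)]
    have hq' : q0 * ((bs.length : Int) - (i : Int)) ≤ M' :=
      (PySem.Int.le_floordiv_iff_mul_le hpos).mp hq
    have hpos' : (0 : Int) < (bs.length : Int) - ((i : Int) + 1) := by
      have : ((i : Int) + 1) < (bs.length : Int) := by exact_mod_cast (by omega : i + 1 < bs.length)
      omega
    have hqnext : q0 ≤ PySem.Int.floordiv (M' - bs.getD i 0) ((bs.length : Int) - (((i + 1 : Nat)) : Int)) := by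
      rw [PySem.Int.le_floordiv_iff_mul_le (by push_cast; omega)]
      push_cast
      nlinarith
    have hcast : ((bs.length : Int) - (i : Int)) - 1 = (bs.length : Int) - (((i + 1 : Nat)) : Int) := by
      push_cast; ring
    rw [hcast]
    have := ih (i + 1) (M' - bs.getD i 0) q0 (by omega) hqnext
      (fun k hk1 hk2 => hall k (by omega) (by omega))
    rw [this]
    have he : i + 1 + d = i + (d + 1) := by omega
    rw [he]
    have hdrop : bs.drop i = bs.getD i 0 :: bs.drop (i + 1) := by
      rw [List.getD_eq_getElem (hn := hiN)]
      exact List.drop_eq_getElem_cons hiN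
    rw [hdrop]
    simp only [List.take_succ_cons, List.sum_cons]
    congr 1
    ring

-- bisectGo never returns bs.length while money is still short of the suffix sum
-- (otherwise the whole suffix would fit under q, contradicting M' < suffix sum)

-- A's greedy loop equals B's round loop, at matching states
lemma capB_eq_loopA (bs : List Int) (hs : List.Pairwise (· ≤ ·) bs) (M : Int) (hM : M < bs.sum) :
    ∀ d i, bs.length - i = d → i < bs.length →
      capB bs (prefixB bs) M i =
        loopA bs bs.length i (M - (bs.take i).sum) ((bs.length : Int) - (i : Int)) := by
  intro d
  induction d using Nat.strong_induction_on with
  | _ d ih =>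
    intro i hd hiN
    have hpref : (PySem.List.pyGet? (prefixB bs) (i : Int)).getD 0 = (bs.take i).sum := by
      rw [gd_eq]; exact prefixB_getD bs i (le_of_lt hiN)
    set Mi := M - (bs.take i).sum with hMi
    set q := PySem.Int.floordiv Mi ((bs.length : Int) - (i : Int)) with hq
    set j := bisectGo bs q i bs.length with hj
    have hge : i ≤ j := bisectGo_ge bs q (bs.length - i) i bs.length rfl
    have hle : j ≤ bs.length := bisectGo_le bs q (bs.length - i) i bs.length rfl (le_of_lt hiN)
    have hinv := bisectGo_inv bs q (bs.length - i) i bs.length rfl (le_of_lt hiN)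
    have hpos : (0 : Int) < (bs.length : Int) - (i : Int) := by
      have : (i : Int) < (bs.length : Int) := by exact_mod_cast hiN
      omega
    have hfloor : q * ((bs.length : Int) - (i : Int)) ≤ Mi :=
      (PySem.Int.le_floordiv_iff_mul_le hpos).mp (le_refl q)
    have hMi_lt : Mi < (bs.drop i).sum := by
      have := List.sum_take_add_sum_drop bs i
      omega
    -- everything in [i, j) is < q
    have hall : ∀ k, i ≤ k → k < j → bs.getD k 0 < q := by
      intro k hk1 hk2
      have hj1 : i < j := by omega
      have hlast := hinv.1 hj1
      calc bs.getD k 0 ≤ bs.getD (j - 1) 0 :=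
            sorted_getD_mono bs hs (by omega) (by omega)
        _ < q := hlast
    -- j < bs.length
    have hjN : j < bs.length := by
      rcases Nat.lt_or_ge j bs.length with h | h
      · exact h
      · exfalso
        have hjeq : j = bs.length := by omega
        have hallmem : ∀ x ∈ bs.drop i, x < q := by
          intro x hx
          rcases List.mem_iff_getElem.mp hx with ⟨t, ht, hxe⟩
          have hlen : (bs.drop i).length = bs.length - i := by simp
          have h1 : (bs.drop i)[t] = bs[i + t] := by
            rw [List.getElem_drop]
          have h2 : bs.getD (i + t) 0 = x := by
            rw [List.getD_eq_getElem (hn := by omega)]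
            rw [← hxe, h1]
          rw [← h2]
          exact hall (i + t) (by omega) (by omega)
        have hsum := sum_le_of_all_lt (bs.drop i) q hallmem
        have hlen : ((bs.drop i).length : Int) = (bs.length : Int) - (i : Int) := by
          rw [List.length_drop]
          omega
        rw [hlen] at hsum
        nlinarith
    rw [capB]
    rw [hpref]
    by_cases hcase : j = i
    · rw [dif_pos (by rw [← hj, ← hq, ← hMi] at *; exact hcase)]
      -- loopA returns q immediately: bs[i] ≥ q
      have hgei : q ≤ bs.getD i 0 := by
        have := hinv.2 (by omega)
        rwa [← hcase]
      rw [loopA, dif_neg (by omega), dif_neg (by omega), gd_eq]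
      rw [if_neg (by omega)]
    · rw [dif_neg (by rw [← hj, ← hq, ← hMi] at *; exact hcase)]
      have hbatch := loopA_batch bs (j - i) i Mi q (by omega) (le_refl q) (by
        intro k hk1 hk2
        exact hall k hk1 (by omega))
      have hji : i + (j - i) = j := by omega
      rw [hji] at hbatch
      rw [hbatch]
      have hrec := ih (bs.length - j) (by omega) j rfl hjN
      rw [hrec]
      have htake : (bs.take j).sum = (bs.take i).sum + ((bs.drop i).take (j - i)).sum := by
        have ht : bs.take (i + (j - i)) = bs.take i ++ (bs.drop i).take (j - i) :=
          List.take_add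
        rw [hji] at ht
        rw [ht, List.sum_append]
      congr 1
      omega

-- top level
lemma solution_eq_alt (budgets : List Int) (M : Int) (h : budgets ≠ []) :
    solution budgets M = solution_alt budgets M := by
  unfold solution solution_alt
  dsimp only
  set bs := PySem.List.sorted budgets (fun x => x) false with hbs
  have hne : bs ≠ [] := by
    rw [hbs, Ne, PySem.List.sorted_eq_nil_iff]
    exact h
  have hN : 0 < bs.length := List.length_pos_of_ne_nil hne
  have hs : List.Pairwise (· ≤ ·) bs := PySem.List.sorted_pairwise budgets (fun x => x)
  have hguard : (PySem.List.pyGet? (prefixB bs) ((bs.length : Nat) : Int)).getD 0 = bs.sum := by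
    rw [gd_eq, prefixB_getD bs bs.length le_rfl, List.take_length]
  rw [hguard]
  by_cases h1 : bs.sum ≤ M
  · simp [h1]
  · simp only [h1, if_false]
    have hM : M < bs.sum := by omega
    have hmain := capB_eq_loopA bs hs M hM bs.length 0 (by omega) hN
    simp only [List.take_zero, List.sum_nil, sub_zero, Nat.cast_zero] at hmain
    rw [hmain]
    by_cases h2 : (PySem.List.pyGet? bs 0).getD 0 > PySem.Int.floordiv M ((bs.length : Int))
    · rw [if_pos h2]
      -- loopA returns the quotient at once
      rw [loopA, dif_neg (by omega), dif_neg (by omega)]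
      simp only [Nat.cast_zero]
      rw [if_neg (by omega)]
    · rw [if_neg h2]

-- ===== VERDICT (by name: the statement is the Claim_ definition above) =====
theorem solution_spec : Claim_equal_solution := by
  intro budgets M _ hpre
  unfold Spec_solution
  exact solution_eq_alt budgets M hpre
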